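-- pv_equiv track=rewrite | github.com/Siddhant77/closetGPT_v1 | src/models/compatibility_engine.py | _same_color_family
-- ===== SOURCE A (Python) =====
-- def _same_color_family(color1: str, color2: str) -> bool:
--     """Check if two colors are in the same family"""
--     color_families = [
--         {'blue', 'navy', 'royal', 'teal'},
--         {'red', 'burgundy', 'maroon', 'pink'},
--         {'green', 'olive', 'forest', 'mint'},
--         {'brown', 'tan', 'khaki', 'beige'},
--         {'gray', 'grey', 'silver', 'charcoal'}
--     ]
--
--     for family in color_families:
--         if color1 in family and color2 in family:
--             return True
--     return False
-- ===== SOURCE B (Python) =====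
-- # B: precomputed color->family-index dict; the check is two lookups and one guarded comparison.
-- COLOR_TO_FAMILY = {
--     'blue': 0, 'navy': 0, 'royal': 0, 'teal': 0,
--     'red': 1, 'burgundy': 1, 'maroon': 1, 'pink': 1,
--     'green': 2, 'olive': 2, 'forest': 2, 'mint': 2,
--     'brown': 3, 'tan': 3, 'khaki': 3, 'beige': 3,
--     'gray': 4, 'grey': 4, 'silver': 4, 'charcoal': 4,
-- }
--
-- def _same_color_family(color1: str, color2: str) -> bool:
--     f1 = COLOR_TO_FAMILY.get(color1)
--     return f1 is not None and f1 == COLOR_TO_FAMILY.get(color2)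
-- ===== Notes on version B (the rewrite author's own statement) =====
-- stated objective: simpler
-- what changed: Replaces the loop over five sets testing both colors per family with a single precomputed color-to-family-index dict and two lookups compared for equality (guarded against both-unknown).
import Mathlib
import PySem

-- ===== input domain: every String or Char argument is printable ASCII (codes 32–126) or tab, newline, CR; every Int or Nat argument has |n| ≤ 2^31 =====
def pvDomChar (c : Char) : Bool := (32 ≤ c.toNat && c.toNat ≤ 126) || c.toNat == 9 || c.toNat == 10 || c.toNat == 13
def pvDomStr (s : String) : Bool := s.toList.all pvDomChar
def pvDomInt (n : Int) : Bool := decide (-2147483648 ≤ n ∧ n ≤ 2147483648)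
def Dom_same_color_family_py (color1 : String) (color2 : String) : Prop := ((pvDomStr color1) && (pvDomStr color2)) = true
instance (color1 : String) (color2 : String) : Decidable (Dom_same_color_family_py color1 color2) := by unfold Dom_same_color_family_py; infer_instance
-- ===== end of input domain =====

-- B replaces A's loop over five sets by one precomputed color→family-index dict and two lookups (objective: simpler).

-- ===== PORT A =====
-- the literal `color_families` list of five sets
def colorFamilies : List (PySem.Set String) :=
  [ PySem.Set.ofList ["blue", "navy", "royal", "teal"],
    PySem.Set.ofList ["red", "burgundy", "maroon", "pink"],
    PySem.Set.ofList ["green", "olive", "forest", "mint"],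
    PySem.Set.ofList ["brown", "tan", "khaki", "beige"],
    PySem.Set.ofList ["gray", "grey", "silver", "charcoal"] ]

-- the `for family in color_families: if color1 in family and color2 in family: return True` loop
def famLoop (color1 color2 : String) : List (PySem.Set String) → Bool
  | [] => false
  | fam :: rest =>
    if PySem.Set.contains fam color1 && PySem.Set.contains fam color2 then true
    else famLoop color1 color2 rest

def same_color_family_py (color1 : String) (color2 : String) : Bool :=
  famLoop color1 color2 colorFamilies

-- ===== PORT B =====
-- the module-level COLOR_TO_FAMILY dict literal of Source B
def colorToFamily : PySem.Dict String Int :=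
  PySem.Dict.ofList
    [("blue",0),("navy",0),("royal",0),("teal",0),
     ("red",1),("burgundy",1),("maroon",1),("pink",1),
     ("green",2),("olive",2),("forest",2),("mint",2),
     ("brown",3),("tan",3),("khaki",3),("beige",3),
     ("gray",4),("grey",4),("silver",4),("charcoal",4)]

-- f1 = COLOR_TO_FAMILY.get(color1); return f1 is not None and f1 == COLOR_TO_FAMILY.get(color2)
def same_color_family_py_alt (color1 : String) (color2 : String) : Bool :=
  match colorToFamily.get? color1 with
  | none => false
  | some f1 => some f1 == colorToFamily.get? color2

-- ===== PRECONDITION & SPEC =====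
def Spec_same_color_family_py (color1 : String) (color2 : String) (out : Bool) : Prop := out = same_color_family_py_alt color1 color2
instance (color1 : String) (color2 : String) (out : Bool) : Decidable (Spec_same_color_family_py color1 color2 out) := by unfold Spec_same_color_family_py; infer_instance

-- ===== CLAIM (what is proved, stated in full; the proofs are below) =====
def Claim_equal_same_color_family_py : Prop := ∀ (color1 : String) (color2 : String), Dom_same_color_family_py color1 color2 → Spec_same_color_family_py color1 color2 (same_color_family_py color1 color2)

-- ===== LEMMAS AND PROOFS =====

-- proof-side helper: the dict lookup as a first-match chain of equality tests
def famIdxChain (c : String) : Option Int :=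
  if c == "blue" then some 0
  else if c == "navy" then some 0
  else if c == "royal" then some 0
  else if c == "teal" then some 0
  else if c == "red" then some 1
  else if c == "burgundy" then some 1
  else if c == "maroon" then some 1
  else if c == "pink" then some 1
  else if c == "green" then some 2
  else if c == "olive" then some 2
  else if c == "forest" then some 2
  else if c == "mint" then some 2
  else if c == "brown" then some 3
  else if c == "tan" then some 3
  else if c == "khaki" then some 3
  else if c == "beige" then some 3
  else if c == "gray" then some 4
  else if c == "grey" then some 4
  else if c == "silver" then some 4
  else if c == "charcoal" then some 4
  else none

theorem get?_chain (c : String) : colorToFamily.get? c = famIdxChain c := by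
  by_cases h0 : c = "blue"
  · subst h0; decide
  by_cases h1 : c = "navy"
  · subst h1; decide
  by_cases h2 : c = "royal"
  · subst h2; decide
  by_cases h3 : c = "teal"
  · subst h3; decide
  by_cases h4 : c = "red"
  · subst h4; decide
  by_cases h5 : c = "burgundy"
  · subst h5; decide
  by_cases h6 : c = "maroon"
  · subst h6; decide
  by_cases h7 : c = "pink"
  · subst h7; decide
  by_cases h8 : c = "green"
  · subst h8; decide
  by_cases h9 : c = "olive"
  · subst h9; decide
  by_cases h10 : c = "forest"
  · subst h10; decide
  by_cases h11 : c = "mint"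
  · subst h11; decide
  by_cases h12 : c = "brown"
  · subst h12; decide
  by_cases h13 : c = "tan"
  · subst h13; decide
  by_cases h14 : c = "khaki"
  · subst h14; decide
  by_cases h15 : c = "beige"
  · subst h15; decide
  by_cases h16 : c = "gray"
  · subst h16; decide
  by_cases h17 : c = "grey"
  · subst h17; decide
  by_cases h18 : c = "silver"
  · subst h18; decide
  by_cases h19 : c = "charcoal"
  · subst h19; decide
  have hmk : colorToFamily = PySem.Dict.mk
    [("blue",0),("navy",0),("royal",0),("teal",0),
     ("red",1),("burgundy",1),("maroon",1),("pink",1),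
     ("green",2),("olive",2),("forest",2),("mint",2),
     ("brown",3),("tan",3),("khaki",3),("beige",3),
     ("gray",4),("grey",4),("silver",4),("charcoal",4)] := by decide
  rw [hmk]
  simp only [PySem.Dict.get?_mk_cons]
  simp [famIdxChain, h0, h1, h2, h3, h4, h5, h6, h7, h8, h9, h10, h11, h12, h13, h14, h15, h16, h17, h18, h19, PySem.Dict.get?, Ne.symm h0, Ne.symm h1, Ne.symm h2, Ne.symm h3,
    Ne.symm h4, Ne.symm h5, Ne.symm h6, Ne.symm h7, Ne.symm h8, Ne.symm h9, Ne.symm h10,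
    Ne.symm h11, Ne.symm h12, Ne.symm h13, Ne.symm h14, Ne.symm h15, Ne.symm h16, Ne.symm h17,
    Ne.symm h18, Ne.symm h19]

theorem altChain (c1 c2 : String) : same_color_family_py_alt c1 c2 =
    (match famIdxChain c1 with
     | none => false
     | some f1 => some f1 == famIdxChain c2) := by
  simp only [same_color_family_py_alt, get?_chain]

theorem chainSome_0 (c : String) :
    ((some (0 : Int) == famIdxChain c) : Bool) = ["blue","navy","royal","teal"].contains c := by
  by_cases h0 : c = "blue"
  · subst h0; decide
  by_cases h1 : c = "navy"
  · subst h1; decide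
  by_cases h2 : c = "royal"
  · subst h2; decide
  by_cases h3 : c = "teal"
  · subst h3; decide
  by_cases h4 : c = "red"
  · subst h4; decide
  by_cases h5 : c = "burgundy"
  · subst h5; decide
  by_cases h6 : c = "maroon"
  · subst h6; decide
  by_cases h7 : c = "pink"
  · subst h7; decide
  by_cases h8 : c = "green"
  · subst h8; decide
  by_cases h9 : c = "olive"
  · subst h9; decide
  by_cases h10 : c = "forest"
  · subst h10; decide
  by_cases h11 : c = "mint"
  · subst h11; decide
  by_cases h12 : c = "brown"
  · subst h12; decide
  by_cases h13 : c = "tan"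
  · subst h13; decide
  by_cases h14 : c = "khaki"
  · subst h14; decide
  by_cases h15 : c = "beige"
  · subst h15; decide
  by_cases h16 : c = "gray"
  · subst h16; decide
  by_cases h17 : c = "grey"
  · subst h17; decide
  by_cases h18 : c = "silver"
  · subst h18; decide
  by_cases h19 : c = "charcoal"
  · subst h19; decide
  simp [famIdxChain, h0, h1, h2, h3, h4, h5, h6, h7, h8, h9, h10, h11, h12, h13, h14, h15, h16, h17, h18, h19]

theorem chainSome_1 (c : String) :
    ((some (1 : Int) == famIdxChain c) : Bool) = ["red","burgundy","maroon","pink"].contains c := by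
  by_cases h0 : c = "blue"
  · subst h0; decide
  by_cases h1 : c = "navy"
  · subst h1; decide
  by_cases h2 : c = "royal"
  · subst h2; decide
  by_cases h3 : c = "teal"
  · subst h3; decide
  by_cases h4 : c = "red"
  · subst h4; decide
  by_cases h5 : c = "burgundy"
  · subst h5; decide
  by_cases h6 : c = "maroon"
  · subst h6; decide
  by_cases h7 : c = "pink"
  · subst h7; decide
  by_cases h8 : c = "green"
  · subst h8; decide
  by_cases h9 : c = "olive"
  · subst h9; decide
  by_cases h10 : c = "forest"
  · subst h10; decide
  by_cases h11 : c = "mint"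
  · subst h11; decide
  by_cases h12 : c = "brown"
  · subst h12; decide
  by_cases h13 : c = "tan"
  · subst h13; decide
  by_cases h14 : c = "khaki"
  · subst h14; decide
  by_cases h15 : c = "beige"
  · subst h15; decide
  by_cases h16 : c = "gray"
  · subst h16; decide
  by_cases h17 : c = "grey"
  · subst h17; decide
  by_cases h18 : c = "silver"
  · subst h18; decide
  by_cases h19 : c = "charcoal"
  · subst h19; decide
  simp [famIdxChain, h0, h1, h2, h3, h4, h5, h6, h7, h8, h9, h10, h11, h12, h13, h14, h15, h16, h17, h18, h19]

theorem chainSome_2 (c : String) :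
    ((some (2 : Int) == famIdxChain c) : Bool) = ["green","olive","forest","mint"].contains c := by
  by_cases h0 : c = "blue"
  · subst h0; decide
  by_cases h1 : c = "navy"
  · subst h1; decide
  by_cases h2 : c = "royal"
  · subst h2; decide
  by_cases h3 : c = "teal"
  · subst h3; decide
  by_cases h4 : c = "red"
  · subst h4; decide
  by_cases h5 : c = "burgundy"
  · subst h5; decide
  by_cases h6 : c = "maroon"
  · subst h6; decide
  by_cases h7 : c = "pink"
  · subst h7; decide
  by_cases h8 : c = "green"
  · subst h8; decide
  by_cases h9 : c = "olive"
  · subst h9; decide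
  by_cases h10 : c = "forest"
  · subst h10; decide
  by_cases h11 : c = "mint"
  · subst h11; decide
  by_cases h12 : c = "brown"
  · subst h12; decide
  by_cases h13 : c = "tan"
  · subst h13; decide
  by_cases h14 : c = "khaki"
  · subst h14; decide
  by_cases h15 : c = "beige"
  · subst h15; decide
  by_cases h16 : c = "gray"
  · subst h16; decide
  by_cases h17 : c = "grey"
  · subst h17; decide
  by_cases h18 : c = "silver"
  · subst h18; decide
  by_cases h19 : c = "charcoal"
  · subst h19; decide
  simp [famIdxChain, h0, h1, h2, h3, h4, h5, h6, h7, h8, h9, h10, h11, h12, h13, h14, h15, h16, h17, h18, h19]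

theorem chainSome_3 (c : String) :
    ((some (3 : Int) == famIdxChain c) : Bool) = ["brown","tan","khaki","beige"].contains c := by
  by_cases h0 : c = "blue"
  · subst h0; decide
  by_cases h1 : c = "navy"
  · subst h1; decide
  by_cases h2 : c = "royal"
  · subst h2; decide
  by_cases h3 : c = "teal"
  · subst h3; decide
  by_cases h4 : c = "red"
  · subst h4; decide
  by_cases h5 : c = "burgundy"
  · subst h5; decide
  by_cases h6 : c = "maroon"
  · subst h6; decide
  by_cases h7 : c = "pink"
  · subst h7; decide
  by_cases h8 : c = "green"
  · subst h8; decide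
  by_cases h9 : c = "olive"
  · subst h9; decide
  by_cases h10 : c = "forest"
  · subst h10; decide
  by_cases h11 : c = "mint"
  · subst h11; decide
  by_cases h12 : c = "brown"
  · subst h12; decide
  by_cases h13 : c = "tan"
  · subst h13; decide
  by_cases h14 : c = "khaki"
  · subst h14; decide
  by_cases h15 : c = "beige"
  · subst h15; decide
  by_cases h16 : c = "gray"
  · subst h16; decide
  by_cases h17 : c = "grey"
  · subst h17; decide
  by_cases h18 : c = "silver"
  · subst h18; decide
  by_cases h19 : c = "charcoal"
  · subst h19; decide
  simp [famIdxChain, h0, h1, h2, h3, h4, h5, h6, h7, h8, h9, h10, h11, h12, h13, h14, h15, h16, h17, h18, h19]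

theorem chainSome_4 (c : String) :
    ((some (4 : Int) == famIdxChain c) : Bool) = ["gray","grey","silver","charcoal"].contains c := by
  by_cases h0 : c = "blue"
  · subst h0; decide
  by_cases h1 : c = "navy"
  · subst h1; decide
  by_cases h2 : c = "royal"
  · subst h2; decide
  by_cases h3 : c = "teal"
  · subst h3; decide
  by_cases h4 : c = "red"
  · subst h4; decide
  by_cases h5 : c = "burgundy"
  · subst h5; decide
  by_cases h6 : c = "maroon"
  · subst h6; decide
  by_cases h7 : c = "pink"
  · subst h7; decide
  by_cases h8 : c = "green"
  · subst h8; decide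
  by_cases h9 : c = "olive"
  · subst h9; decide
  by_cases h10 : c = "forest"
  · subst h10; decide
  by_cases h11 : c = "mint"
  · subst h11; decide
  by_cases h12 : c = "brown"
  · subst h12; decide
  by_cases h13 : c = "tan"
  · subst h13; decide
  by_cases h14 : c = "khaki"
  · subst h14; decide
  by_cases h15 : c = "beige"
  · subst h15; decide
  by_cases h16 : c = "gray"
  · subst h16; decide
  by_cases h17 : c = "grey"
  · subst h17; decide
  by_cases h18 : c = "silver"
  · subst h18; decide
  by_cases h19 : c = "charcoal"
  · subst h19; decide
  simp [famIdxChain, h0, h1, h2, h3, h4, h5, h6, h7, h8, h9, h10, h11, h12, h13, h14, h15, h16, h17, h18, h19]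

theorem equal_aux (color1 color2 : String) :
    same_color_family_py color1 color2 = same_color_family_py_alt color1 color2 := by
  have hfams : colorFamilies =
    [["blue","navy","royal","teal"],["red","burgundy","maroon","pink"],
     ["green","olive","forest","mint"],["brown","tan","khaki","beige"],
     ["gray","grey","silver","charcoal"]] := by decide
  by_cases m0 : color1 = "blue"
  · subst m0
    rw [altChain]
    have hc : famIdxChain "blue" = some 0 := by decide
    rw [hc]
    show same_color_family_py "blue" color2 = ((some (0 : Int) == famIdxChain color2) : Bool)
    rw [chainSome_0, same_color_family_py, hfams]
    simp [famLoop, PySem.Set.contains]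
  by_cases m1 : color1 = "navy"
  · subst m1
    rw [altChain]
    have hc : famIdxChain "navy" = some 0 := by decide
    rw [hc]
    show same_color_family_py "navy" color2 = ((some (0 : Int) == famIdxChain color2) : Bool)
    rw [chainSome_0, same_color_family_py, hfams]
    simp [famLoop, PySem.Set.contains]
  by_cases m2 : color1 = "royal"
  · subst m2
    rw [altChain]
    have hc : famIdxChain "royal" = some 0 := by decide
    rw [hc]
    show same_color_family_py "royal" color2 = ((some (0 : Int) == famIdxChain color2) : Bool)
    rw [chainSome_0, same_color_family_py, hfams]
    simp [famLoop, PySem.Set.contains]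
  by_cases m3 : color1 = "teal"
  · subst m3
    rw [altChain]
    have hc : famIdxChain "teal" = some 0 := by decide
    rw [hc]
    show same_color_family_py "teal" color2 = ((some (0 : Int) == famIdxChain color2) : Bool)
    rw [chainSome_0, same_color_family_py, hfams]
    simp [famLoop, PySem.Set.contains]
  by_cases m4 : color1 = "red"
  · subst m4
    rw [altChain]
    have hc : famIdxChain "red" = some 1 := by decide
    rw [hc]
    show same_color_family_py "red" color2 = ((some (1 : Int) == famIdxChain color2) : Bool)
    rw [chainSome_1, same_color_family_py, hfams]
    simp [famLoop, PySem.Set.contains]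
  by_cases m5 : color1 = "burgundy"
  · subst m5
    rw [altChain]
    have hc : famIdxChain "burgundy" = some 1 := by decide
    rw [hc]
    show same_color_family_py "burgundy" color2 = ((some (1 : Int) == famIdxChain color2) : Bool)
    rw [chainSome_1, same_color_family_py, hfams]
    simp [famLoop, PySem.Set.contains]
  by_cases m6 : color1 = "maroon"
  · subst m6
    rw [altChain]
    have hc : famIdxChain "maroon" = some 1 := by decide
    rw [hc]
    show same_color_family_py "maroon" color2 = ((some (1 : Int) == famIdxChain color2) : Bool)
    rw [chainSome_1, same_color_family_py, hfams]
    simp [famLoop, PySem.Set.contains]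
  by_cases m7 : color1 = "pink"
  · subst m7
    rw [altChain]
    have hc : famIdxChain "pink" = some 1 := by decide
    rw [hc]
    show same_color_family_py "pink" color2 = ((some (1 : Int) == famIdxChain color2) : Bool)
    rw [chainSome_1, same_color_family_py, hfams]
    simp [famLoop, PySem.Set.contains]
  by_cases m8 : color1 = "green"
  · subst m8
    rw [altChain]
    have hc : famIdxChain "green" = some 2 := by decide
    rw [hc]
    show same_color_family_py "green" color2 = ((some (2 : Int) == famIdxChain color2) : Bool)
    rw [chainSome_2, same_color_family_py, hfams]
    simp [famLoop, PySem.Set.contains]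
  by_cases m9 : color1 = "olive"
  · subst m9
    rw [altChain]
    have hc : famIdxChain "olive" = some 2 := by decide
    rw [hc]
    show same_color_family_py "olive" color2 = ((some (2 : Int) == famIdxChain color2) : Bool)
    rw [chainSome_2, same_color_family_py, hfams]
    simp [famLoop, PySem.Set.contains]
  by_cases m10 : color1 = "forest"
  · subst m10
    rw [altChain]
    have hc : famIdxChain "forest" = some 2 := by decide
    rw [hc]
    show same_color_family_py "forest" color2 = ((some (2 : Int) == famIdxChain color2) : Bool)
    rw [chainSome_2, same_color_family_py, hfams]
    simp [famLoop, PySem.Set.contains]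
  by_cases m11 : color1 = "mint"
  · subst m11
    rw [altChain]
    have hc : famIdxChain "mint" = some 2 := by decide
    rw [hc]
    show same_color_family_py "mint" color2 = ((some (2 : Int) == famIdxChain color2) : Bool)
    rw [chainSome_2, same_color_family_py, hfams]
    simp [famLoop, PySem.Set.contains]
  by_cases m12 : color1 = "brown"
  · subst m12
    rw [altChain]
    have hc : famIdxChain "brown" = some 3 := by decide
    rw [hc]
    show same_color_family_py "brown" color2 = ((some (3 : Int) == famIdxChain color2) : Bool)
    rw [chainSome_3, same_color_family_py, hfams]
    simp [famLoop, PySem.Set.contains]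
  by_cases m13 : color1 = "tan"
  · subst m13
    rw [altChain]
    have hc : famIdxChain "tan" = some 3 := by decide
    rw [hc]
    show same_color_family_py "tan" color2 = ((some (3 : Int) == famIdxChain color2) : Bool)
    rw [chainSome_3, same_color_family_py, hfams]
    simp [famLoop, PySem.Set.contains]
  by_cases m14 : color1 = "khaki"
  · subst m14
    rw [altChain]
    have hc : famIdxChain "khaki" = some 3 := by decide
    rw [hc]
    show same_color_family_py "khaki" color2 = ((some (3 : Int) == famIdxChain color2) : Bool)
    rw [chainSome_3, same_color_family_py, hfams]
    simp [famLoop, PySem.Set.contains]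
  by_cases m15 : color1 = "beige"
  · subst m15
    rw [altChain]
    have hc : famIdxChain "beige" = some 3 := by decide
    rw [hc]
    show same_color_family_py "beige" color2 = ((some (3 : Int) == famIdxChain color2) : Bool)
    rw [chainSome_3, same_color_family_py, hfams]
    simp [famLoop, PySem.Set.contains]
  by_cases m16 : color1 = "gray"
  · subst m16
    rw [altChain]
    have hc : famIdxChain "gray" = some 4 := by decide
    rw [hc]
    show same_color_family_py "gray" color2 = ((some (4 : Int) == famIdxChain color2) : Bool)
    rw [chainSome_4, same_color_family_py, hfams]
    simp [famLoop, PySem.Set.contains]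
  by_cases m17 : color1 = "grey"
  · subst m17
    rw [altChain]
    have hc : famIdxChain "grey" = some 4 := by decide
    rw [hc]
    show same_color_family_py "grey" color2 = ((some (4 : Int) == famIdxChain color2) : Bool)
    rw [chainSome_4, same_color_family_py, hfams]
    simp [famLoop, PySem.Set.contains]
  by_cases m18 : color1 = "silver"
  · subst m18
    rw [altChain]
    have hc : famIdxChain "silver" = some 4 := by decide
    rw [hc]
    show same_color_family_py "silver" color2 = ((some (4 : Int) == famIdxChain color2) : Bool)
    rw [chainSome_4, same_color_family_py, hfams]
    simp [famLoop, PySem.Set.contains]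
  by_cases m19 : color1 = "charcoal"
  · subst m19
    rw [altChain]
    have hc : famIdxChain "charcoal" = some 4 := by decide
    rw [hc]
    show same_color_family_py "charcoal" color2 = ((some (4 : Int) == famIdxChain color2) : Bool)
    rw [chainSome_4, same_color_family_py, hfams]
    simp [famLoop, PySem.Set.contains]
  -- color1 matches no color key: A finds no family containing it, B's first lookup is None
  rw [altChain]
  have hn : famIdxChain color1 = none := by
    simp [famIdxChain, m0, m1, m2, m3, m4, m5, m6, m7, m8, m9, m10, m11, m12, m13, m14, m15, m16, m17, m18, m19]
  rw [hn]
  rw [same_color_family_py, hfams]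
  simp [famLoop, PySem.Set.contains, m0, m1, m2, m3, m4, m5, m6, m7, m8, m9, m10, m11, m12, m13, m14, m15, m16, m17, m18, m19]

-- ===== VERDICT (by name: the statement is the Claim_ definition above) =====
theorem same_color_family_py_spec : Claim_equal_same_color_family_py := by
  intro color1 color2 _
  unfold Spec_same_color_family_py
  exact equal_aux color1 color2
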